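-- pv_equiv track=rewrite | github.com/ttresser/small_codes | exer_2_hipotenusa.py | analise_primo
-- ===== SOURCE A (Python) =====
-- def analise_primo(n):
--     if n >= 2:
--         j = n - 1
--         primalidade = True
--         while j > 1 and primalidade:
--             rest = n % j
--             if rest == 0:
--                 primalidade = False
--             j = j - 1
--     else:
--         primalidade = False
--     return primalidade
-- ===== SOURCE B (Python) =====
-- def analise_primo(n):
--     if n < 2:
--         return False
--     i = 2
--     while i * i <= n:
--         if n % i == 0:
--             return False
--         i += 1
--     return True
-- ===== Notes on version B (the rewrite author's own statement) =====
-- stated objective: faster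
-- what changed: Replaces A's downward scan over every candidate divisor below n with upward trial division that stops at the square root of n, exiting early on the first divisor found.
import Mathlib
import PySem

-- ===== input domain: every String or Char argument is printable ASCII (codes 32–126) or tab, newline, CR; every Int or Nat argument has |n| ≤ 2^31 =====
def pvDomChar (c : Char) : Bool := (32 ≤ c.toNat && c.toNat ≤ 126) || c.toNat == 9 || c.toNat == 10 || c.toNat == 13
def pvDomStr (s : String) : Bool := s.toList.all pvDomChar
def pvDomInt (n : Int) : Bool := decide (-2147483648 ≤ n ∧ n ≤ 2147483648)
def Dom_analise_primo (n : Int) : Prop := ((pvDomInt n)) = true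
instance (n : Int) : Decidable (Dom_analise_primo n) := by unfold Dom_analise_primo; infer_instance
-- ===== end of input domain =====

-- B replaces A's downward scan over every candidate divisor n-1..2 with upward trial division
-- stopping at sqrt(n) (objective: faster, asymptotic O(sqrt n) vs O(n)).

-- ===== PORT A =====
-- 'while j > 1 and primalidade: rest = n % j; if rest == 0: primalidade = False; j = j - 1'
-- fuel-based structural recursion over the same state (j, primalidade); fuel n.toNat bounds the iterations.
def analiseLoopA (n : Int) (fuel : Nat) (j : Int) (prim : Bool) : Bool :=
  match fuel with
  | 0 => prim
  | fuel + 1 =>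
      if j > 1 && prim then
        analiseLoopA n fuel (j - 1) (if PySem.Int.mod n j = 0 then false else prim)
      else prim

def analise_primo (n : Int) : Bool :=
  if n ≥ 2 then analiseLoopA n n.toNat (n - 1) true else false

-- ===== PORT B =====
-- 'i = 2; while i*i <= n: if n % i == 0: return False; i += 1; return True'
def analiseLoopB (n : Int) (fuel : Nat) (i : Int) : Bool :=
  match fuel with
  | 0 => true
  | fuel + 1 =>
      if i * i ≤ n then
        if PySem.Int.mod n i = 0 then false else analiseLoopB n fuel (i + 1)
      else true

def analise_primo_alt (n : Int) : Bool :=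
  if n < 2 then false else analiseLoopB n n.toNat 2

-- ===== PRECONDITION & SPEC =====
def Spec_analise_primo (n : Int) (out : Bool) : Prop := out = analise_primo_alt n
instance (n : Int) (out : Bool) : Decidable (Spec_analise_primo n out) := by unfold Spec_analise_primo; infer_instance

-- ===== CLAIM (what is proved, stated in full; the proofs are below) =====
def Claim_equal_analise_primo : Prop := ∀ (n : Int), Dom_analise_primo n → Spec_analise_primo n (analise_primo n)

-- ===== LEMMAS AND PROOFS =====

theorem analiseLoopA_false (n : Int) (fuel : Nat) (j : Int) :
    analiseLoopA n fuel j false = false := by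
  induction fuel generalizing j with
  | zero => rfl
  | succ f ih => simp [analiseLoopA]

-- A's loop, started with primalidade = True, returns True iff no k with 1 < k ≤ j divides n.
theorem analiseLoopA_char (n : Int) (fuel : Nat) (j : Int) (hf : j - 1 ≤ (fuel : Int)) :
    (analiseLoopA n fuel j true = true ↔ ∀ k : Int, 1 < k → k ≤ j → ¬ (k ∣ n)) := by
  induction fuel generalizing j with
  | zero =>
      simp only [analiseLoopA, true_iff]
      intro k hk hkj
      omega
  | succ f ih =>
      by_cases hj : j > 1
      · simp only [analiseLoopA, hj, decide_true, Bool.and_self, if_pos]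
        by_cases hd : PySem.Int.mod n j = 0
        · rw [if_pos hd, analiseLoopA_false]
          rw [PySem.Int.mod_eq_zero_iff_dvd] at hd
          constructor
          · intro h; exact absurd h (by simp)
          · intro h; exact absurd hd (h j hj le_rfl)
        · rw [if_neg hd, ih (j - 1) (by omega)]
          rw [PySem.Int.mod_eq_zero_iff_dvd] at hd
          constructor
          · intro h k hk hkj
            rcases lt_or_eq_of_le hkj with h' | h'
            · exact h k hk (by omega)
            · subst h'; exact hd
          · intro h k hk hkj; exact h k hk (by omega)
      · have hL : analiseLoopA n (f + 1) j true = true := by simp [analiseLoopA, hj]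
        rw [hL]
        constructor
        · intro _ k hk hkj; omega
        · intro _; rfl

-- B's loop returns True iff no k ≥ i with k*k ≤ n divides n.
theorem analiseLoopB_char (n : Int) (fuel : Nat) (i : Int) (hi : 1 ≤ i)
    (hf : n < i + (fuel : Int)) :
    (analiseLoopB n fuel i = true ↔ ∀ k : Int, i ≤ k → k * k ≤ n → ¬ (k ∣ n)) := by
  induction fuel generalizing i with
  | zero =>
      simp only [analiseLoopB, true_iff]
      intro k hk hkk
      have h1 : 1 ≤ k := le_trans hi hk
      have : k ≤ k * k := le_mul_of_one_le_left (by omega) h1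
      simp only [Nat.cast_zero, add_zero] at hf
      omega
  | succ f ih =>
      by_cases hle : i * i ≤ n
      · simp only [analiseLoopB, if_pos hle]
        by_cases hd : PySem.Int.mod n i = 0
        · rw [if_pos hd]
          rw [PySem.Int.mod_eq_zero_iff_dvd] at hd
          constructor
          · intro h; exact absurd h (by simp)
          · intro h; exact absurd hd (h i le_rfl hle)
        · rw [if_neg hd, ih (i + 1) (by omega) (by push_cast at hf ⊢; omega)]
          rw [PySem.Int.mod_eq_zero_iff_dvd] at hd
          constructor
          · intro h k hk hkk
            rcases lt_or_eq_of_le hk with h' | h'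
            · exact h k (by omega) hkk
            · subst h'; exact hd
          · intro h k hk hkk; exact h k (by omega) hkk
      · simp only [analiseLoopB, if_neg hle, true_iff]
        intro k hk hkk
        have : i * i ≤ k * k := mul_le_mul hk hk (by omega) (by omega)
        omega

-- the mathematical bridge: scanning all divisors < n and scanning divisors up to sqrt(n) agree
theorem divisor_bridge (n : Int) (hn : 2 ≤ n) :
    (∀ k : Int, 1 < k → k ≤ n - 1 → ¬ (k ∣ n)) ↔
      (∀ k : Int, 2 ≤ k → k * k ≤ n → ¬ (k ∣ n)) := by
  constructor
  · intro h k hk hkk hdvd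
    have h2k : 2 * k ≤ k * k := by nlinarith
    exact h k (by omega) (by omega) hdvd
  · intro h k hk hkj hdvd
    by_cases hkk : k * k ≤ n
    · exact h k (by omega) hkk hdvd
    · -- k divides n and k*k > n: the cofactor d = n / k satisfies 2 ≤ d and d*d ≤ n
      obtain ⟨d, hd⟩ := hdvd
      have hkpos : 0 < k := by omega
      have hdpos : 0 < d := by nlinarith
      have hd2 : 2 ≤ d := by
        by_contra h'
        have hd1 : d = 1 := by omega
        rw [hd1, mul_one] at hd
        omega
      have hdk : d < k := by nlinarith
      have hdd : d * d ≤ n := by nlinarith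
      exact h d hd2 hdd ⟨k, by linarith [hd, mul_comm k d]⟩

-- ===== VERDICT (by name: the statement is the Claim_ definition above) =====
theorem analise_primo_spec : Claim_equal_analise_primo := by
  intro n _
  unfold Spec_analise_primo analise_primo analise_primo_alt
  by_cases hn : n ≥ 2
  · rw [if_pos hn, if_neg (by omega)]
    have hA := analiseLoopA_char n n.toNat (n - 1) (by omega)
    have hB := analiseLoopB_char n n.toNat 2 (by omega) (by omega)
    rw [Bool.eq_iff_iff, hA, hB]
    constructor
    · intro h k hk2 hkk
      exact (divisor_bridge n hn).mp (fun m hm hmn => h m hm (by omega)) k hk2 hkk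
    · intro h k hk hkn
      exact (divisor_bridge n hn).mpr (fun m hm hmm => h m (by omega) hmm) k hk (by omega)
  · rw [if_neg hn, if_pos (by omega)]
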